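-- pv_equiv track=rewrite | github.com/yan-ren/programming-class | python_demo_programs/2021/example_20210725.py | process_people_emails
-- ===== SOURCE A (Python) =====
-- def process_people_emails(l):
--     people_dic = {}
--     for email in l:
--         user_name = email.split("@")[0]
--         if user_name in people_dic:
--             people_dic[user_name].append(email)
--         else:
--             people_dic[user_name] = [email]
--
--     return people_dic
-- ===== SOURCE B (Python) =====
-- def process_people_emails(l):
--     users = list(dict.fromkeys(e.split("@")[0] for e in l))
--     return {u: [e for e in l if e.split("@")[0] == u] for u in users}
-- ===== Notes on version B (the rewrite author's own statement) =====
-- stated objective: simpler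
-- what changed: Replaces A's single-pass incremental dict maintenance (membership test, then append-or-insert per email) with two staged passes and no maintained dict: an ordered dedup of the username prefixes via dict.fromkeys, then one filter comprehension over the whole list per distinct username; this trades A's linear time for O(n*k) nested scans in exchange for a 3-line implementation.
import Mathlib
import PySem

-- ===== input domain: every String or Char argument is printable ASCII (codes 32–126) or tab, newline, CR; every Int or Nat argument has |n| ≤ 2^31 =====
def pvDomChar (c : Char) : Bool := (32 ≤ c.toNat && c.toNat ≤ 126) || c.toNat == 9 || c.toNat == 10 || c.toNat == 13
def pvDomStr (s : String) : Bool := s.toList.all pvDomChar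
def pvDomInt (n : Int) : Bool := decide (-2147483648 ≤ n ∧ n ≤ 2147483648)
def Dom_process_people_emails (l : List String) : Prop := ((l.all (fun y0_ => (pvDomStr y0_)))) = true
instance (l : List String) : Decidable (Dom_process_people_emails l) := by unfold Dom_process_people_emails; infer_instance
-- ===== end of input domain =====

-- B replaces A's single-pass dict maintenance with staged nested scans: an ordered dedup of
-- username prefixes, then one filter pass over the whole list per distinct username.

-- ===== PORT A =====
-- email.split("@")[0]: split? with the nonempty separator "@" always returns some nonempty list,
-- so the getD/headD defaults are unreachable and this is exact (no IndexError possible).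
def pvUser (email : String) : String := ((PySem.Str.split? email "@").getD []).headD ""

def process_people_emails (l : List String) : List (String × List String) :=
  (l.foldl (fun people_dic email =>
      let user_name := pvUser email
      if people_dic.contains user_name then
        people_dic.modify user_name [] (fun v => v ++ [email])   -- people_dic[user_name].append(email)
      else
        people_dic.insert user_name [email])
    (PySem.Dict.empty : PySem.Dict String (List String))).items

-- ===== PORT B =====
-- list(dict.fromkeys(e.split("@")[0] for e in l)) = ordered dedup of the username prefixes
-- (PySem.List.dedup is exactly list(dict.fromkeys(·))), then a dict comprehension whose value
-- for each user is the filter pass [e for e in l if e.split("@")[0] == u].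
def process_people_emails_alt (l : List String) : List (String × List String) :=
  (PySem.List.dedup (l.map pvUser)).map
    (fun u => (u, l.filter (fun e => pvUser e == u)))

-- ===== PRECONDITION & SPEC =====
def Spec_process_people_emails (l : List String) (out : List (String × List String)) : Prop := out = process_people_emails_alt l
instance (l : List String) (out : List (String × List String)) : Decidable (Spec_process_people_emails l out) := by unfold Spec_process_people_emails; infer_instance

-- ===== CLAIM (what is proved, stated in full; the proofs are below) =====
def Claim_equal_process_people_emails : Prop := ∀ (l : List String), Dom_process_people_emails l → Spec_process_people_emails l (process_people_emails l)

-- ===== LEMMAS AND PROOFS =====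

-- A's branched step IS an unconditional modify: in the absent-key branch getD gives [].
theorem pv_step_eq (d : PySem.Dict String (List String)) (email : String) :
    (if d.contains (pvUser email) then d.modify (pvUser email) [] (fun v => v ++ [email])
     else d.insert (pvUser email) [email])
    = d.modify (pvUser email) [] (fun v => v ++ [email]) := by
  by_cases h : d.contains (pvUser email)
  · simp [h]
  · simp only [Bool.not_eq_true] at h
    simp [h, PySem.Dict.modify, PySem.Dict.getD_of_not_contains d ([] : List String) h]

-- items of a nodup-keyed dict = keys paired with their getD values
theorem pv_items_eq_keys_map {κ ν : Type} [BEq κ] [LawfulBEq κ]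
    (d : PySem.Dict κ ν) (dflt : ν) (h : d.keys.Nodup) :
    d.items = d.keys.map (fun k => (k, d.getD k dflt)) := by
  show d.items = (d.items.map (·.1)).map (fun k => (k, d.getD k dflt))
  rw [List.map_map]
  refine Eq.symm ?_
  calc d.items.map (fun p => ((p.1, d.getD p.1 dflt) : κ × ν))
      = d.items.map id := List.map_congr_left (fun p hp => by
        have := PySem.Dict.getD_of_mem_items (k := p.1) (v := p.2) (d := d) (d0 := dflt)
          (by exact hp) h
        simp [this])
    _ = d.items := List.map_id _

theorem process_people_emails_eq_modify_fold (l : List String) :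
    process_people_emails l
      = (l.foldl (fun d email => d.modify (pvUser email) [] (fun v => v ++ [email]))
          (PySem.Dict.empty : PySem.Dict String (List String))).items := by
  unfold process_people_emails
  congr 1
  exact PySem.List.foldl_congr_mem l _ _ _ (fun d email _ => pv_step_eq d email)

theorem pv_getD_fold_from (l : List String) (u : String) (d : PySem.Dict String (List String)) :
    (l.foldl (fun d email => d.modify (pvUser email) [] (fun v => v ++ [email])) d).getD u []
      = d.getD u [] ++ l.filter (fun email => pvUser email == u) := by
  have h := PySem.Dict.getD_foldl_modify_append
      (l := l.map (fun e => (pvUser e, e))) (d := d) (c := u)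
  rw [List.foldl_map] at h
  simpa [List.filter_map, Function.comp_def] using h

theorem pv_keys_fold (l : List String) :
    (l.foldl (fun d email => d.modify (pvUser email) [] (fun v => v ++ [email]))
        (PySem.Dict.empty : PySem.Dict String (List String))).keys
      = PySem.List.dedup (l.map pvUser) := by
  have h := PySem.Dict.keys_foldl_modify_key (l := l) (key := pvUser) (d0 := ([] : List String))
      (f := fun _ email => fun v => v ++ [email])
      (d := (PySem.Dict.empty : PySem.Dict String (List String)))
  simpa [PySem.Set.update, PySem.Set.ofList, PySem.Dict.keys_empty] using h

theorem pv_nodup_keys_fold (l : List String) :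
    (l.foldl (fun d email => d.modify (pvUser email) [] (fun v => v ++ [email]))
        (PySem.Dict.empty : PySem.Dict String (List String))).keys.Nodup := by
  exact PySem.Dict.nodup_keys_foldl_modify_key l pvUser []
    (fun _ email => fun v => v ++ [email]) _ (by simp [PySem.Dict.keys_empty])

-- ===== VERDICT (by name: the statement is the Claim_ definition above) =====
theorem process_people_emails_spec : Claim_equal_process_people_emails := by
  intro l _
  show process_people_emails l = process_people_emails_alt l
  rw [process_people_emails_eq_modify_fold l, process_people_emails_alt,
      pv_items_eq_keys_map _ ([] : List String) (pv_nodup_keys_fold l),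
      pv_keys_fold l]
  exact List.map_congr_left (fun u _ => by
    rw [pv_getD_fold_from l u _, PySem.Dict.getD_empty, List.nil_append])
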